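-- pv_equiv track=rewrite | github.com/thomasahle/julehjerte | algorithm/embedded_dual.py | _boundary_runs
-- ===== SOURCE A (Python) =====
-- from typing import Dict, Iterable, List, Optional, Sequence, Tuple
--
-- def _boundary_runs(seq: Sequence[int]) -> List[Tuple[int, int, int]]:
--     """
--     Runs on a 1D boundary: returns [(face_id, start, end_excl), ...].
--     """
--     if not seq:
--         return []
--     runs: List[Tuple[int, int, int]] = []
--     cur = int(seq[0])
--     start = 0
--     for i in range(1, len(seq)):
--         v = int(seq[i])
--         if v != cur:
--             runs.append((cur, start, i))
--             cur = v
--             start = i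
--     runs.append((cur, start, len(seq)))
--     return runs
-- ===== SOURCE B (Python) =====
-- from typing import List, Sequence, Tuple
--
--
-- def _boundary_runs(seq: Sequence[int]) -> List[Tuple[int, int, int]]:
--     """
--     Runs on a 1D boundary: returns [(face_id, start, end_excl), ...].
--
--     Cut-point decomposition: first collect every boundary index where the
--     value changes, then emit one run per consecutive pair of cut points.
--     """
--     if not seq:
--         return []
--     n = len(seq)
--     cuts = [0] + [i for i in range(1, n) if int(seq[i]) != int(seq[i - 1])] + [n]
--     return [(int(seq[a]), a, b) for a, b in zip(cuts, cuts[1:])]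
-- ===== Notes on version B (the rewrite author's own statement) =====
-- stated objective: alternative
-- what changed: Replaces A's rolling current-value/start accumulator loop by a two-phase cut-point decomposition: first collect all change indices (plus 0 and len), then emit one run per consecutive pair of cut points.
import Mathlib
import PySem

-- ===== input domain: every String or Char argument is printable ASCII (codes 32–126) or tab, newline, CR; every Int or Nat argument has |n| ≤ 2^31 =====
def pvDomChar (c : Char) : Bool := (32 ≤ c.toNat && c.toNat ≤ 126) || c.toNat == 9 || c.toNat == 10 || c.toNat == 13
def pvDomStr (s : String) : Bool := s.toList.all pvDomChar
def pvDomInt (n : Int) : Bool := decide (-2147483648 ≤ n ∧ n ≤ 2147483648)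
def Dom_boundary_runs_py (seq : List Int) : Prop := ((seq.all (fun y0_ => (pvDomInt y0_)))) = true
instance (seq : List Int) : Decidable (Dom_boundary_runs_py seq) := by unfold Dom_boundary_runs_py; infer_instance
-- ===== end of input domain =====

-- B replaces A's rolling current-value/start accumulator by a two-phase
-- cut-point decomposition (collect change indices, then pair them up);
-- same O(n) cost, proved to return the identical run list.

-- ===== PORT A =====
def boundary_runs_py (seq : List Int) : List (Int × Int × Int) :=
  match seq with
  | [] => []
  | v0 :: _ =>
    let s := (PySem.List.pyRange 1 (seq.length : Int) 1).foldl
      (fun (st : Int × Int × List (Int × Int × Int)) i =>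
        let v := PySem.List.pyGetD seq i 0
        if v ≠ st.1 then (v, i, st.2.2 ++ [(st.1, st.2.1, i)]) else st)
      (v0, 0, [])
    s.2.2 ++ [(s.1, s.2.1, (seq.length : Int))]

-- ===== PORT B =====
def boundary_runs_py_alt (seq : List Int) : List (Int × Int × Int) :=
  if seq.isEmpty then []
  else
    let n : Int := (seq.length : Int)
    let cuts : List Int :=
      0 :: ((PySem.List.pyRange 1 n 1).filter
        (fun i => PySem.List.pyGetD seq i 0 != PySem.List.pyGetD seq (i - 1) 0) ++ [n])
    (cuts.zip cuts.tail).map (fun p => (PySem.List.pyGetD seq p.1 0, p.1, p.2))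

-- ===== PRECONDITION & SPEC =====
def Spec_boundary_runs_py (seq : List Int) (out : List (Int × Int × Int)) : Prop := out = boundary_runs_py_alt seq
instance (seq : List Int) (out : List (Int × Int × Int)) : Decidable (Spec_boundary_runs_py seq out) := by unfold Spec_boundary_runs_py; infer_instance

-- ===== CLAIM (what is proved, stated in full; the proofs are below) =====
def Claim_equal_boundary_runs_py : Prop := ∀ (seq : List Int), Dom_boundary_runs_py seq → Spec_boundary_runs_py seq (boundary_runs_py seq)

-- ===== LEMMAS AND PROOFS =====

-- Reference recursion: the run list of `seq` from index `i`, with a pending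
-- run of value `cur` that started at `start`.
def goIdx (seq : List Int) (cur start : Int) (i : Nat) : List (Int × Int × Int) :=
  if h : i < seq.length then
    let v := seq[i]
    if v = cur then goIdx seq cur start (i + 1)
    else (cur, start, (i : Int)) :: goIdx seq v (i : Int) (i + 1)
  else [(cur, start, (seq.length : Int))]
termination_by seq.length - i

-- Structural form of B's zip/map pass over the cut list.
def mapCuts (seq : List Int) : List Int → List (Int × Int × Int)
  | [] => []
  | [_] => []
  | c1 :: c2 :: rest => (PySem.List.pyGetD seq c1 0, c1, c2) :: mapCuts seq (c2 :: rest)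

lemma zipmap_eq_mapCuts (seq : List Int) : ∀ (cuts : List Int),
    (cuts.zip cuts.tail).map (fun p => (PySem.List.pyGetD seq p.1 0, p.1, p.2))
      = mapCuts seq cuts
  | [] => rfl
  | [_] => rfl
  | c1 :: c2 :: rest => by
    have h := zipmap_eq_mapCuts seq (c2 :: rest)
    simp only [List.tail_cons] at h
    simp only [List.tail_cons, List.zip_cons_cons, List.map_cons, mapCuts, h]

lemma A_loop (seq : List Int) :
    ∀ (k a : Nat) (cur start : Int) (acc : List (Int × Int × Int)),
    seq.length - a = k →
    (let s := (PySem.List.pyRange (a : Int) (seq.length : Int) 1).foldl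
        (fun (st : Int × Int × List (Int × Int × Int)) i =>
          let v := PySem.List.pyGetD seq i 0
          if v ≠ st.1 then (v, i, st.2.2 ++ [(st.1, st.2.1, i)]) else st)
        (cur, start, acc)
     s.2.2 ++ [(s.1, s.2.1, (seq.length : Int))]) = acc ++ goIdx seq cur start a := by
  intro k
  induction k with
  | zero =>
    intro a cur start acc hk
    have ha : seq.length ≤ a := by omega
    rw [PySem.List.pyRange_one_eq_nil (by exact_mod_cast ha)]
    rw [goIdx]
    simp [Nat.not_lt.mpr ha]
  | succ k ih =>
    intro a cur start acc hk
    have ha : a < seq.length := by omega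
    rw [PySem.List.pyRange_one_cons (by exact_mod_cast ha)]
    have hget : PySem.List.pyGetD seq (a : Int) 0 = seq[a] := by
      simp [PySem.List.pyGetD_natCast, List.getD_eq_getElem?_getD, ha]
    rw [goIdx]
    have h1 : ((a : Int) + 1) = ((a + 1 : Nat) : Int) := by push_cast; ring
    by_cases hv : seq[a] = cur
    · have H := ih (a + 1) cur start acc (by omega)
      simp only [List.foldl_cons, hget, hv, h1, ha, dif_pos] at *
      simpa using H
    · have H := ih (a + 1) seq[a] (a : Int) (acc ++ [(cur, start, (a : Int))]) (by omega)
      simp only [List.foldl_cons, hget, h1, ha, dif_pos] at *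
      simp [hv] at H ⊢
      simpa [List.append_assoc] using H

lemma B_loop (seq : List Int) :
    ∀ (k a : Nat) (cur start : Int),
    seq.length - a = k → 1 ≤ a → a ≤ seq.length →
    PySem.List.pyGetD seq start 0 = cur →
    PySem.List.pyGetD seq ((a : Int) - 1) 0 = cur →
    mapCuts seq (start :: ((PySem.List.pyRange (a : Int) (seq.length : Int) 1).filter
        (fun i => PySem.List.pyGetD seq i 0 != PySem.List.pyGetD seq (i - 1) 0)
      ++ [(seq.length : Int)]))
      = goIdx seq cur start a := by
  intro k
  induction k with
  | zero =>
    intro a cur start hk h1 h2 hs hp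
    have ha : seq.length ≤ a := by omega
    rw [PySem.List.pyRange_one_eq_nil (by exact_mod_cast ha)]
    rw [goIdx]
    simp [Nat.not_lt.mpr ha, mapCuts, hs]
  | succ k ih =>
    intro a cur start hk h1 h2 hs hp
    have ha : a < seq.length := by omega
    rw [PySem.List.pyRange_one_cons (by exact_mod_cast ha)]
    have hget : PySem.List.pyGetD seq (a : Int) 0 = seq[a] := by
      simp [PySem.List.pyGetD_natCast, List.getD_eq_getElem?_getD, ha]
    have h1c : ((a : Int) + 1) = ((a + 1 : Nat) : Int) := by push_cast; ring
    have hp1 : PySem.List.pyGetD seq (((a + 1 : Nat) : Int) - 1) 0 = seq[a] := by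
      rw [show (((a + 1 : Nat) : Int) - 1) = (a : Int) by push_cast; ring, hget]
    rw [goIdx]
    simp only [ha, dif_pos]
    by_cases hv : seq[a] = cur
    · have hpred : (PySem.List.pyGetD seq (a : Int) 0
          != PySem.List.pyGetD seq ((a : Int) - 1) 0) = false := by
        simp [hget, hp, hv]
      rw [List.filter_cons_of_neg (by simp only [hpred]; exact Bool.false_ne_true)]
      rw [if_pos hv, h1c]
      exact ih (a + 1) cur start (by omega) (by omega) (by omega) hs (hv ▸ hp1)
    · have hpred : (PySem.List.pyGetD seq (a : Int) 0
          != PySem.List.pyGetD seq ((a : Int) - 1) 0) = true := by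
        simp [hget, hp, hv]
      rw [List.filter_cons_of_pos (by exact hpred)]
      rw [if_neg hv, h1c]
      have := ih (a + 1) seq[a] (a : Int) (by omega) (by omega) (by omega) hget hp1
      simp only [List.cons_append, mapCuts, hs]
      rw [this]

-- ===== VERDICT (by name: the statement is the Claim_ definition above) =====
theorem boundary_runs_py_spec : Claim_equal_boundary_runs_py := by
  intro seq _
  unfold Spec_boundary_runs_py
  match seq with
  | [] => rfl
  | v0 :: tl =>
    rw [boundary_runs_py, boundary_runs_py_alt]
    rw [if_neg (by simp : ¬(((v0 :: tl).isEmpty : Bool) = true))]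
    rw [zipmap_eq_mapCuts]
    have hA := A_loop (v0 :: tl) ((v0 :: tl).length - 1) 1 v0 0 []
      (by simp)
    have hB := B_loop (v0 :: tl) ((v0 :: tl).length - 1) 1 v0 0
      (by simp) (by omega) (by simp) (by norm_num) (by norm_num)
    simp only [Nat.cast_one] at hA hB
    rw [hA, hB]
    simp
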